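-- pv_equiv track=rewrite | github.com/JimKueneman/OpenLcbCLib | bootloader/tools/hex2bin/hex2bin.py | crc3_crc16_ibm
-- ===== SOURCE A (Python) =====
-- _CRC16_IBM_HI = (
--     0x0000, 0xCC01, 0xD801, 0x1400, 0xF001, 0x3C00, 0x2800, 0xE401,
--     0xA001, 0x6C00, 0x7800, 0xB401, 0x5000, 0x9C01, 0x8801, 0x4400,
-- )
--
-- _CRC16_IBM_LO = (
--     0x0000, 0xC0C1, 0xC181, 0x0140, 0xC301, 0x03C0, 0x0280, 0xC241,
--     0xC601, 0x06C0, 0x0780, 0xC741, 0x0500, 0xC5C1, 0xC481, 0x0440,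
-- )
--
-- def _crc16_ibm_add(state, byte):
--     """Append one byte to a running CRC-16-IBM state.
--
--     Args:
--         state: Current 16-bit CRC state.
--         byte:  Next input byte (0-255).
--
--     Returns:
--         Updated 16-bit CRC state.
--     """
--     state ^= byte
--     state = (state >> 8) ^ _CRC16_IBM_LO[state & 0x0F] ^ \
--             _CRC16_IBM_HI[(state >> 4) & 0x0F]
--     return state & 0xFFFF
--
-- def crc3_crc16_ibm(data):
--     """Compute triple CRC-16-IBM (all, odd, even).
--
--     Matches BootloaderCrc_crc3_crc16_ibm() in the C library.
--     Three independent CRC-16-IBM accumulators run in parallel: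
--       - all:  every byte
--       - odd:  bytes at 1-based odd positions (1, 3, 5, ...)
--       - even: bytes at 1-based even positions (2, 4, 6, ...)
--
--     The odd/even split is 1-based to match the C implementation where
--     the byte counter starts at 1 (incremented before the odd/even check).
--
--     Each CRC accumulator starts at 0x0000 and processes its subset of
--     bytes independently.  The three CRCs together provide stronger error
--     detection than a single CRC-16 alone: a bit error that happens to
--     leave the all-bytes CRC unchanged is extremely unlikely to also
--     leave both the odd and even CRCs unchanged.
--
--     Args:
--         data: Input bytes (the region to checksum).
--
--     Returns:
--         Tuple of (crc_all, crc_odd, crc_even), each a uint16.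
--     """
--     state_all = 0x0000
--     state_odd = 0x0000
--     state_even = 0x0000
--
--     for byte_index, b in enumerate(data, 1):
--         state_all = _crc16_ibm_add(state_all, b)
--         if byte_index & 1:
--             state_odd = _crc16_ibm_add(state_odd, b)
--         else:
--             state_even = _crc16_ibm_add(state_even, b)
--
--     return (state_all, state_odd, state_even)
-- ===== SOURCE B (Python) =====
-- _CRC16_IBM_HI = (
--     0x0000, 0xCC01, 0xD801, 0x1400, 0xF001, 0x3C00, 0x2800, 0xE401,
--     0xA001, 0x6C00, 0x7800, 0xB401, 0x5000, 0x9C01, 0x8801, 0x4400,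
-- )
--
-- _CRC16_IBM_LO = (
--     0x0000, 0xC0C1, 0xC181, 0x0140, 0xC301, 0x03C0, 0x0280, 0xC241,
--     0xC601, 0x06C0, 0x0780, 0xC741, 0x0500, 0xC5C1, 0xC481, 0x0440,
-- )
--
--
-- def crc3_crc16_ibm(data):
--     """Triple CRC-16-IBM (all, 1-based odd positions, 1-based even positions).
--
--     One reusable single-CRC reduction applied to three position-sliced
--     subsequences instead of one interleaved branching pass.
--     """
--     def crc16(seq):
--         s = 0x0000
--         for b in seq:
--             s ^= b
--             s = ((s >> 8) ^ _CRC16_IBM_LO[s & 0x0F] ^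
--                  _CRC16_IBM_HI[(s >> 4) & 0x0F]) & 0xFFFF
--         return s
--
--     return (crc16(data), crc16(data[0::2]), crc16(data[1::2]))
-- ===== Notes on version B (the rewrite author's own statement) =====
-- stated objective: simpler
-- what changed: Replaces A's single interleaved pass with a 1-based index parity branch updating three accumulators by one reusable crc16 fold applied three times, to the whole list and to the position slices data[0::2] and data[1::2], eliminating the index bookkeeping and the parity test.
import Mathlib
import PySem

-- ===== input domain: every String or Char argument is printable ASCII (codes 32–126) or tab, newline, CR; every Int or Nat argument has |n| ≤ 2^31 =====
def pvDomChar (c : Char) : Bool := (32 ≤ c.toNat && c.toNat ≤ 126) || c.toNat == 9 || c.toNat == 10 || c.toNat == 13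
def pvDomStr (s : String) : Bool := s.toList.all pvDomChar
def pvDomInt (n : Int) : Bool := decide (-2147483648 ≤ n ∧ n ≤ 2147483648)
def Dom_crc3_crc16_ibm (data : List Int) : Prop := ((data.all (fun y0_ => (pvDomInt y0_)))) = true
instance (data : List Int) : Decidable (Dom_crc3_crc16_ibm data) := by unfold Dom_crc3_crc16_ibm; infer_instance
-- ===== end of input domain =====

-- B replaces A's single interleaved pass (parity branch on a 1-based index) by one reusable
-- single-CRC fold applied to three position-sliced subsequences (all, data[0::2], data[1::2]);
-- objective: simpler decomposition, same exact results.


-- ===== PORT A =====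
def pvCRC16_IBM_HI : List Int :=
  [0x0000, 0xCC01, 0xD801, 0x1400, 0xF001, 0x3C00, 0x2800, 0xE401,
   0xA001, 0x6C00, 0x7800, 0xB401, 0x5000, 0x9C01, 0x8801, 0x4400]

def pvCRC16_IBM_LO : List Int :=
  [0x0000, 0xC0C1, 0xC181, 0x0140, 0xC301, 0x03C0, 0x0280, 0xC241,
   0xC601, 0x06C0, 0x0780, 0xC741, 0x0500, 0xC5C1, 0xC481, 0x0440]

-- _crc16_ibm_add; the table indices 'x & 0x0F' are always in 0..15, so pyGetD _ _ 0 is exact here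
def pvCrc16IbmAdd (state byte : Int) : Int :=
  let s := PySem.Int.bxor state byte
  let s2 := PySem.Int.bxor (PySem.Int.bxor (s >>> (8 : Nat))
              (PySem.List.pyGetD pvCRC16_IBM_LO (PySem.Int.band s 0x0F) 0))
              (PySem.List.pyGetD pvCRC16_IBM_HI (PySem.Int.band (s >>> (4 : Nat)) 0x0F) 0)
  PySem.Int.band s2 0xFFFF

-- the 'for byte_index, b in enumerate(data, 1)' loop as index-carrying structural recursion
def pvLoopA : List Int → Nat → Int → Int → Int → Int × Int × Int
  | [], _, sa, so, se => (sa, so, se)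
  | b :: rest, i, sa, so, se =>
    let sa' := pvCrc16IbmAdd sa b
    if i &&& 1 ≠ 0 then pvLoopA rest (i + 1) sa' (pvCrc16IbmAdd so b) se
    else pvLoopA rest (i + 1) sa' so (pvCrc16IbmAdd se b)

def crc3_crc16_ibm (data : List Int) : Int × Int × Int :=
  pvLoopA data 1 0 0 0

-- ===== PORT B =====
-- crc16(seq): fold the inlined table update over seq from 0x0000
def pvCrc16 (seq : List Int) : Int :=
  seq.foldl (fun state byte =>
    let s := PySem.Int.bxor state byte
    let s2 := PySem.Int.bxor (PySem.Int.bxor (s >>> (8 : Nat))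
                (PySem.List.pyGetD pvCRC16_IBM_LO (PySem.Int.band s 0x0F) 0))
                (PySem.List.pyGetD pvCRC16_IBM_HI (PySem.Int.band (s >>> (4 : Nat)) 0x0F) 0)
    PySem.Int.band s2 0xFFFF) 0x0000

-- data[0::2] and data[1::2]; step 2 ≠ 0 so slice? always returns some, .getD [] is exact
def crc3_crc16_ibm_alt (data : List Int) : Int × Int × Int :=
  (pvCrc16 data,
   pvCrc16 ((PySem.List.slice? data (some 0) none 2).getD []),
   pvCrc16 ((PySem.List.slice? data (some 1) none 2).getD []))

-- ===== PRECONDITION & SPEC =====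
def Spec_crc3_crc16_ibm (data : List Int) (out : Int × Int × Int) : Prop := out = crc3_crc16_ibm_alt data
instance (data : List Int) (out : Int × Int × Int) : Decidable (Spec_crc3_crc16_ibm data out) := by unfold Spec_crc3_crc16_ibm; infer_instance

-- ===== CLAIM (what is proved, stated in full; the proofs are below) =====
def Claim_equal_crc3_crc16_ibm : Prop := ∀ (data : List Int), Dom_crc3_crc16_ibm data → Spec_crc3_crc16_ibm data (crc3_crc16_ibm data)

-- ===== LEMMAS AND PROOFS =====

-- every-other-element subsequence starting at the head (= xs[0::2])
def pvAlt : List Int → List Int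
  | [] => []
  | [a] => [a]
  | a :: _ :: rest => a :: pvAlt rest

lemma pvAlt_cons (b : Int) (rest : List Int) : pvAlt (b :: rest) = b :: pvAlt rest.tail := by
  cases rest <;> rfl

lemma pvCrc16_eq (seq : List Int) : pvCrc16 seq = seq.foldl pvCrc16IbmAdd 0 := rfl

lemma pvFmNat : ∀ (xs : List Int),
    (List.range ((xs.length + 1) / 2)).filterMap (fun k => xs[2 * k]?) = pvAlt xs := by
  intro xs
  induction xs using pvAlt.induct with
  | case1 => simp [pvAlt]
  | case2 a => simp [pvAlt]
  | case3 a b rest ih =>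
    have hc : (((a :: b :: rest).length + 1) / 2) = (rest.length + 1) / 2 + 1 := by
      simp; omega
    rw [hc, List.range_succ_eq_map, List.filterMap_cons, List.filterMap_map]
    have hf : ((fun k => (a :: b :: rest)[2 * k]?) ∘ Nat.succ) = (fun k => rest[2 * k]?) := by
      funext k
      have : 2 * Nat.succ k = (2 * k) + 1 + 1 := by omega
      simp [Function.comp, this]
    rw [hf, ih]
    simp [pvAlt]

lemma pvSlice_zero_two (xs : List Int) :
    PySem.List.slice? xs (some 0) none 2 = some (pvAlt xs) := by
  rw [← pvFmNat xs]
  simp only [PySem.List.slice?, PySem.List.sliceIndices]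
  norm_num
  have hc : (if 0 < xs.length then (((xs.length : Int) + 2 - 1) / 2).toNat else 0)
      = (xs.length + 1) / 2 := by split_ifs with h <;> omega
  have hf : (fun x : Nat => xs[(2 * (x : Int)).toNat]?) = (fun k : Nat => xs[2 * k]?) := by
    funext k
    have : (2 * (k : Int)).toNat = 2 * k := by omega
    rw [this]
  rw [hc, hf]

lemma pvSlice_one_two (xs : List Int) :
    PySem.List.slice? xs (some 1) none 2 = some (pvAlt xs.tail) := by
  cases xs with
  | nil => rfl
  | cons a t =>
    rw [List.tail_cons, ← pvFmNat t]
    simp only [PySem.List.slice?, PySem.List.sliceIndices]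
    norm_num
    have hc : (if 0 < t.length then (((t.length : Int) + 2 - 1) / 2).toNat else 0)
        = (t.length + 1) / 2 := by split_ifs with h <;> omega
    have hf : (fun x : Nat => (a :: t)[(1 + 2 * (x : Int)).toNat]?) = (fun k : Nat => t[2 * k]?) := by
      funext k
      have : (1 + 2 * (k : Int)).toNat = 2 * k + 1 := by omega
      rw [this, List.getElem?_cons_succ]
    rw [hc, hf]

lemma pvLoopA_spec (xs : List Int) : ∀ (i : Nat) (sa so se : Int),
    pvLoopA xs i sa so se =
      (xs.foldl pvCrc16IbmAdd sa,
       if i % 2 = 1 then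
         ((pvAlt xs).foldl pvCrc16IbmAdd so, (pvAlt xs.tail).foldl pvCrc16IbmAdd se)
       else
         ((pvAlt xs.tail).foldl pvCrc16IbmAdd so, (pvAlt xs).foldl pvCrc16IbmAdd se)) := by
  induction xs with
  | nil => intro i sa so se; cases h : i % 2 <;> simp [pvLoopA, pvAlt]
  | cons b rest ih =>
    intro i sa so se
    have hand : i &&& 1 = i % 2 := Nat.and_one_is_mod i
    rcases Nat.mod_two_eq_zero_or_one i with h | h
    · have h' : (i + 1) % 2 = 1 := by omega
      simp only [pvLoopA, hand, h, pvAlt_cons, List.tail_cons, if_neg (by omega : ¬ (0:Nat) ≠ 0),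
        ih (i + 1), h', List.foldl_cons]
      simp
    · have h' : (i + 1) % 2 = 0 := by omega
      simp only [pvLoopA, hand, h, pvAlt_cons, List.tail_cons, if_pos (by omega : (1:Nat) ≠ 0),
        ih (i + 1), h', List.foldl_cons]
      simp

-- ===== VERDICT (by name: the statement is the Claim_ definition above) =====
theorem crc3_crc16_ibm_spec : Claim_equal_crc3_crc16_ibm := by
  intro data _
  show crc3_crc16_ibm data = crc3_crc16_ibm_alt data
  unfold crc3_crc16_ibm crc3_crc16_ibm_alt
  rw [pvSlice_zero_two, pvSlice_one_two, Option.getD_some, Option.getD_some,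
    pvCrc16_eq, pvCrc16_eq, pvCrc16_eq, pvLoopA_spec]
  norm_num
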